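-- pv_equiv track=rewrite | github.com/ashleyharris-maptek-com-au/SpatialCompetenceBenchmark | placebo_data/q9.py | _subproblem_to_pattern
-- ===== SOURCE A (Python) =====
-- def _subproblem_to_pattern(cells: set, blocked: set, bbox: tuple = None) -> tuple:
--   """
--   Convert a subproblem to a normalized pattern.
--   Returns (pattern_str, offset) where offset is (min_x, min_y) used for normalization.
--   Pattern format: rows separated by newlines, '.' = traversable, 'X' = blocked, '?' = not relevant
--   """
--   if not cells:
--     return "", (0, 0)
--
--   # Get bounding box
--   all_relevant = cells | blocked
--   if bbox:
--     min_x, min_y, max_x, max_y = bbox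
--   else:
--     xs = [c[0] for c in all_relevant]
--     ys = [c[1] for c in all_relevant]
--     min_x, max_x = min(xs), max(xs)
--     min_y, max_y = min(ys), max(ys)
--
--   # Build pattern (normalized to origin)
--   rows = []
--   for y in range(max_y, min_y - 1, -1):  # Top to bottom
--     row = ""
--     for x in range(min_x, max_x + 1):
--       if (x, y) in cells:
--         row += "."
--       elif (x, y) in blocked:
--         row += "X"
--       else:
--         row += "?"
--     rows.append(row)
--
--   pattern = "\n".join(rows)
--   return pattern, (min_x, min_y)
-- ===== SOURCE B (Python) =====
-- def _subproblem_to_pattern(cells: set, blocked: set, bbox: tuple = None) -> tuple: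
--   """Scatter-write version: build the grid once and write each point into it,
--   instead of scanning both sets for every grid position."""
--   if not cells:
--     return "", (0, 0)
--
--   if bbox:
--     min_x, min_y, max_x, max_y = bbox
--   else:
--     xs = [p[0] for p in cells] + [p[0] for p in blocked]
--     ys = [p[1] for p in cells] + [p[1] for p in blocked]
--     min_x, min_y, max_x, max_y = min(xs), min(ys), max(xs), max(ys)
--
--   width = max_x - min_x + 1
--   height = max_y - min_y + 1
--   grid = [['?'] * width for _ in range(height)]
--   # blocked first, cells second: cells win at overlaps, like the original's branch order
--   for pts, ch in ((blocked, 'X'), (cells, '.')):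
--     for x, y in pts:
--       if min_x <= x <= max_x and min_y <= y <= max_y:
--         grid[max_y - y][x - min_x] = ch
--
--   pattern = "\n".join(''.join(row) for row in grid)
--   return pattern, (min_x, min_y)
-- ===== Notes on version B (the rewrite author's own statement) =====
-- stated objective: alternative
-- what changed: Instead of scanning both sets for every grid position with nested range loops, B allocates a '?'-filled 2D grid once and scatter-writes each blocked point ('X') then each in-box cell point ('.') into it, joining the rows at the end; the bounding box is taken from the raw coordinate lists instead of the union set.
import Mathlib
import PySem

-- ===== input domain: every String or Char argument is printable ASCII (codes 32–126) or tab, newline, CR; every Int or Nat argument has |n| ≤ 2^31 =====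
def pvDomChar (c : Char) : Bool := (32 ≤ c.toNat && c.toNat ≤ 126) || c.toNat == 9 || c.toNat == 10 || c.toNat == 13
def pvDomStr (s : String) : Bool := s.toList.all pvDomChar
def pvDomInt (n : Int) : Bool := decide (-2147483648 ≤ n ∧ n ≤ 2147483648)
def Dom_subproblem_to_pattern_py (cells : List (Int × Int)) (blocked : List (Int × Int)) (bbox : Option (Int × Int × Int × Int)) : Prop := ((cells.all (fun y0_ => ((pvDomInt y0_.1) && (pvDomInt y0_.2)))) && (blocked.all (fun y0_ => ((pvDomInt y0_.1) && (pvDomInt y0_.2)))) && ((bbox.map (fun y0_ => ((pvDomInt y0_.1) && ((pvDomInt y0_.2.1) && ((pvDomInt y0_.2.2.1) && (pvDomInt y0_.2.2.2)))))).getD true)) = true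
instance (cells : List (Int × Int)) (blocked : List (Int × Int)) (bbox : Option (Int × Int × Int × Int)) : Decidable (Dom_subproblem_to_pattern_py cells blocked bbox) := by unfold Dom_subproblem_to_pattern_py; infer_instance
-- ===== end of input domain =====

-- B replaces A's per-position membership scan of both sets by one '?'-filled grid into which each
-- blocked/cell point is written once (objective: alternative decomposition; return value identical).

-- ===== PORT A =====
-- bounding box as A computes it: from bbox if given, else min/max over the union set
def pvBoxA (cells blocked : List (Int × Int)) (bbox : Option (Int × Int × Int × Int)) : Int × Int × Int × Int :=
  match bbox with
  | some b => b
  | none =>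
    let all_relevant : PySem.Set (Int × Int) := PySem.Set.union (PySem.Set.ofList cells) blocked
    let xs := all_relevant.map (·.1)
    let ys := all_relevant.map (·.2)
    ((PySem.List.min? xs (fun v => v)).getD 0, (PySem.List.min? ys (fun v => v)).getD 0,
     (PySem.List.max? xs (fun v => v)).getD 0, (PySem.List.max? ys (fun v => v)).getD 0)

-- the inner 'for x in range(min_x, max_x + 1)' loop building one row string
def pvRowA (cells blocked : List (Int × Int)) (min_x max_x y : Int) : String :=
  (PySem.List.pyRange min_x (max_x + 1) 1).foldl (fun row x =>
    if (x, y) ∈ cells then row ++ "."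
    else if (x, y) ∈ blocked then row ++ "X"
    else row ++ "?") ""

def subproblem_to_pattern_py (cells : List (Int × Int)) (blocked : List (Int × Int)) (bbox : Option (Int × Int × Int × Int)) : String × (Int × Int) :=
  if cells = [] then ("", (0, 0)) else
  let q := pvBoxA cells blocked bbox
  let min_x := q.1; let min_y := q.2.1; let max_x := q.2.2.1; let max_y := q.2.2.2
  let rows := (PySem.List.pyRange max_y (min_y - 1) (-1)).foldl
    (fun rows y => rows ++ [pvRowA cells blocked min_x max_x y]) []
  (PySem.Str.join "\n" rows, (min_x, min_y))

-- ===== PORT B =====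
-- bounding box as B computes it: from bbox if given, else min/max over the two raw coordinate lists
def pvBoxB (cells blocked : List (Int × Int)) (bbox : Option (Int × Int × Int × Int)) : Int × Int × Int × Int :=
  match bbox with
  | some b => b
  | none =>
    let xs := cells.map (·.1) ++ blocked.map (·.1)
    let ys := cells.map (·.2) ++ blocked.map (·.2)
    ((PySem.List.min? xs (fun v => v)).getD 0, (PySem.List.min? ys (fun v => v)).getD 0,
     (PySem.List.max? xs (fun v => v)).getD 0, (PySem.List.max? ys (fun v => v)).getD 0)

-- 'for x, y in pts: if in box: grid[max_y - y][x - min_x] = ch'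
-- (the guard keeps both indices in range, so List.getD/List.set are exact for Python's grid[r][c] = ch)
def pvScatter (min_x min_y max_x max_y : Int) (ch : Char) (pts : List (Int × Int)) (g : List (List Char)) : List (List Char) :=
  pts.foldl (fun g p =>
    if min_x ≤ p.1 ∧ p.1 ≤ max_x ∧ min_y ≤ p.2 ∧ p.2 ≤ max_y then
      g.set (max_y - p.2).toNat ((g.getD (max_y - p.2).toNat []).set (p.1 - min_x).toNat ch)
    else g) g

def subproblem_to_pattern_py_alt (cells : List (Int × Int)) (blocked : List (Int × Int)) (bbox : Option (Int × Int × Int × Int)) : String × (Int × Int) :=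
  if cells = [] then ("", (0, 0)) else
  let q := pvBoxB cells blocked bbox
  let min_x := q.1; let min_y := q.2.1; let max_x := q.2.2.1; let max_y := q.2.2.2
  let width := (max_x - min_x + 1).toNat
  let height := (max_y - min_y + 1).toNat
  let grid := List.replicate height (List.replicate width '?')
  let grid := pvScatter min_x min_y max_x max_y 'X' blocked grid
  let grid := pvScatter min_x min_y max_x max_y '.' cells grid
  (PySem.Str.join "\n" (grid.map (fun row => String.ofList row)), (min_x, min_y))

-- ===== PRECONDITION & SPEC =====
def Spec_subproblem_to_pattern_py (cells : List (Int × Int)) (blocked : List (Int × Int)) (bbox : Option (Int × Int × Int × Int)) (out : String × (Int × Int)) : Prop := out = subproblem_to_pattern_py_alt cells blocked bbox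
instance (cells : List (Int × Int)) (blocked : List (Int × Int)) (bbox : Option (Int × Int × Int × Int)) (out : String × (Int × Int)) : Decidable (Spec_subproblem_to_pattern_py cells blocked bbox out) := by unfold Spec_subproblem_to_pattern_py; infer_instance

-- ===== CLAIM (what is proved, stated in full; the proofs are below) =====
def Claim_equal_subproblem_to_pattern_py : Prop := ∀ (cells : List (Int × Int)) (blocked : List (Int × Int)) (bbox : Option (Int × Int × Int × Int)), Dom_subproblem_to_pattern_py cells blocked bbox → Spec_subproblem_to_pattern_py cells blocked bbox (subproblem_to_pattern_py cells blocked bbox)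

-- ===== LEMMAS AND PROOFS =====

-- the character A's branch chain picks for position (x, y)
def pvCh (cells blocked : List (Int × Int)) (x y : Int) : Char :=
  if (x, y) ∈ cells then '.' else if (x, y) ∈ blocked then 'X' else '?'

-- canonical h×w character matrix
def pvMat (h w : Nat) (f : Nat → Nat → Char) : List (List Char) :=
  (List.range h).map (fun r => (List.range w).map (f r))

theorem pvMat_congr {h w : Nat} {f g : Nat → Nat → Char}
    (hfg : ∀ r < h, ∀ c < w, f r c = g r c) : pvMat h w f = pvMat h w g := by
  unfold pvMat
  refine List.map_congr_left (fun r hr => ?_)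
  exact List.map_congr_left (fun c hc => hfg r (List.mem_range.mp hr) c (List.mem_range.mp hc))

theorem pvStrFoldl (chr : Int → Char) (l : List Int) (s : String) :
    l.foldl (fun s x => s ++ String.ofList [chr x]) s = String.ofList (s.toList ++ l.map chr) := by
  induction l generalizing s with
  | nil => simp
  | cons a t ih => simp [List.foldl_cons, ih]

theorem pvRowA_eq (cells blocked : List (Int × Int)) (min_x max_x y : Int) :
    pvRowA cells blocked min_x max_x y
      = String.ofList ((PySem.List.pyRange min_x (max_x + 1) 1).map (fun x => pvCh cells blocked x y)) := by
  unfold pvRowA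
  have hfun : (fun (row : String) x =>
      if (x, y) ∈ cells then row ++ "."
      else if (x, y) ∈ blocked then row ++ "X"
      else row ++ "?")
      = fun (row : String) x => row ++ String.ofList [pvCh cells blocked x y] := by
    funext row x
    by_cases h1 : (x, y) ∈ cells <;> by_cases h2 : (x, y) ∈ blocked <;>
      simp [pvCh, h1, h2]
  rw [hfun, pvStrFoldl]
  rfl


theorem pvMat_const (h w : Nat) :
    pvMat h w (fun _ _ => '?') = List.replicate h (List.replicate w '?') := by
  simp [pvMat, List.map_const']

-- one write step of pvScatter, on a canonical matrix
theorem pvScatter_step (min_x min_y max_x max_y : Int) (ch : Char) (p : Int × Int)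
    (h w : Nat) (hh : h = (max_y - min_y + 1).toNat) (hw : w = (max_x - min_x + 1).toNat)
    (f : Nat → Nat → Char) :
    (if min_x ≤ p.1 ∧ p.1 ≤ max_x ∧ min_y ≤ p.2 ∧ p.2 ≤ max_y then
       (pvMat h w f).set (max_y - p.2).toNat
         (((pvMat h w f).getD (max_y - p.2).toNat []).set (p.1 - min_x).toNat ch)
     else pvMat h w f)
    = pvMat h w (fun r c =>
        if (min_x ≤ min_x + (c : Int) ∧ min_x + (c : Int) ≤ max_x ∧
            min_y ≤ max_y - (r : Int) ∧ max_y - (r : Int) ≤ max_y) ∧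
           p = (min_x + (c : Int), max_y - (r : Int)) then ch else f r c) := by
  by_cases hin : min_x ≤ p.1 ∧ p.1 ≤ max_x ∧ min_y ≤ p.2 ∧ p.2 ≤ max_y
  · obtain ⟨hb1, hb2, hb3, hb4⟩ := hin
    rw [if_pos ⟨hb1, hb2, hb3, hb4⟩]
    have hr0 : (max_y - p.2).toNat < h := by omega
    have hrow : (pvMat h w f).getD (max_y - p.2).toNat []
        = (List.range w).map (f (max_y - p.2).toNat) := by
      rw [List.getD_eq_getElem?_getD]
      unfold pvMat
      rw [List.getElem?_map, List.getElem?_range hr0]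
      rfl
    rw [hrow]
    apply List.ext_getElem?
    intro r
    rw [List.getElem?_set]
    by_cases hr : (max_y - p.2).toNat = r
    · subst hr
      rw [if_pos rfl, if_pos (by simpa [pvMat] using hr0)]
      unfold pvMat
      rw [List.getElem?_map, List.getElem?_range hr0]
      simp only [Option.map_some]
      congr 1
      apply List.ext_getElem?
      intro c
      rw [List.getElem?_set]
      by_cases hc : (p.1 - min_x).toNat = c
      · subst hc
        have hcw : (p.1 - min_x).toNat < w := by omega
        rw [if_pos rfl, if_pos (by simpa using hcw)]
        rw [List.getElem?_map, List.getElem?_range hcw]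
        simp only [Option.map_some, Option.some.injEq]
        rw [if_pos]
        refine ⟨⟨by omega, by omega, by omega, by omega⟩, ?_⟩
        have : min_x + ((p.1 - min_x).toNat : Int) = p.1 := by omega
        have h2 : max_y - ((max_y - p.2).toNat : Int) = p.2 := by omega
        rw [this, h2]
      · rw [if_neg hc]
        rw [List.getElem?_map, List.getElem?_map]
        by_cases hcw : c < w
        · rw [List.getElem?_range hcw]
          simp only [Option.map_some, Option.some.injEq]
          rw [if_neg]
          intro ⟨_, hpeq⟩
          apply hc
          have := congrArg Prod.fst hpeq
          simp at this
          omega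
        · rw [List.getElem?_eq_none (by simpa using Nat.le_of_not_lt hcw)]
          rfl
    · rw [if_neg hr]
      unfold pvMat
      rw [List.getElem?_map, List.getElem?_map]
      by_cases hrh : r < h
      · rw [List.getElem?_range hrh]
        simp only [Option.map_some, Option.some.injEq]
        apply List.map_congr_left
        intro c _
        rw [if_neg]
        intro ⟨_, hpeq⟩
        apply hr
        have := congrArg Prod.snd hpeq
        simp at this
        omega
      · rw [List.getElem?_eq_none (by simpa using Nat.le_of_not_lt hrh)]
        rfl
  · rw [if_neg hin]
    refine (pvMat_congr (fun r _ c _ => ?_)).symm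
    rw [if_neg]
    intro ⟨hbox, hpeq⟩
    apply hin
    rw [hpeq]
    exact ⟨hbox.1, hbox.2.1, hbox.2.2.1, hbox.2.2.2⟩

theorem pvScatter_mat (min_x min_y max_x max_y : Int) (ch : Char) (pts : List (Int × Int))
    (h w : Nat) (hh : h = (max_y - min_y + 1).toNat) (hw : w = (max_x - min_x + 1).toNat)
    (f : Nat → Nat → Char) :
    pvScatter min_x min_y max_x max_y ch pts (pvMat h w f)
    = pvMat h w (fun r c =>
        if (min_x ≤ min_x + (c : Int) ∧ min_x + (c : Int) ≤ max_x ∧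
            min_y ≤ max_y - (r : Int) ∧ max_y - (r : Int) ≤ max_y) ∧
           (min_x + (c : Int), max_y - (r : Int)) ∈ pts then ch else f r c) := by
  induction pts generalizing f with
  | nil =>
    refine (pvMat_congr (fun r _ c _ => ?_)).symm
    rw [if_neg (by simp)]
  | cons p rest ih =>
    show pvScatter min_x min_y max_x max_y ch rest (if _ then _ else _) = _
    rw [pvScatter_step min_x min_y max_x max_y ch p h w hh hw f, ih]
    apply pvMat_congr
    intro r _ c _
    simp only [List.mem_cons]
    by_cases hbox : min_x ≤ min_x + (c : Int) ∧ min_x + (c : Int) ≤ max_x ∧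
        min_y ≤ max_y - (r : Int) ∧ max_y - (r : Int) ≤ max_y
    · by_cases hmem : (min_x + (c : Int), max_y - (r : Int)) ∈ rest
      · rw [if_pos ⟨hbox, hmem⟩, if_pos ⟨hbox, Or.inr hmem⟩]
      · rw [if_neg (fun hcontra => hmem hcontra.2)]
        by_cases hp : p = (min_x + (c : Int), max_y - (r : Int))
        · rw [if_pos ⟨hbox, hp⟩, if_pos ⟨hbox, Or.inl hp.symm⟩]
        · rw [if_neg (fun hcontra => hp hcontra.2), if_neg]
          intro ⟨_, hor⟩
          rcases hor with h1 | h2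
          · exact hp h1.symm
          · exact hmem h2
    · rw [if_neg (fun hcontra => hbox hcontra.1), if_neg (fun hcontra => hbox hcontra.1),
          if_neg (fun hcontra => hbox hcontra.1)]

theorem pvGrid_eq (cells blocked : List (Int × Int)) (min_x min_y max_x max_y : Int) :
    pvScatter min_x min_y max_x max_y '.' cells
      (pvScatter min_x min_y max_x max_y 'X' blocked
        (List.replicate (max_y - min_y + 1).toNat (List.replicate (max_x - min_x + 1).toNat '?')))
    = pvMat (max_y - min_y + 1).toNat (max_x - min_x + 1).toNat
        (fun r c => pvCh cells blocked (min_x + c) (max_y - r)) := by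
  rw [← pvMat_const, pvScatter_mat _ _ _ _ _ _ _ _ rfl rfl, pvScatter_mat _ _ _ _ _ _ _ _ rfl rfl]
  apply pvMat_congr
  intro r hr c hc
  have hbox : min_x ≤ min_x + (c : Int) ∧ min_x + (c : Int) ≤ max_x ∧
      min_y ≤ max_y - (r : Int) ∧ max_y - (r : Int) ≤ max_y := by
    refine ⟨by omega, by omega, by omega, by omega⟩
  simp only [pvCh, hbox, true_and]

theorem pvCore (cells blocked : List (Int × Int)) (min_x min_y max_x max_y : Int) :
    PySem.Str.join "\n"
      ((PySem.List.pyRange max_y (min_y - 1) (-1)).foldl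
        (fun rows y => rows ++ [pvRowA cells blocked min_x max_x y]) [])
    = PySem.Str.join "\n"
      ((pvScatter min_x min_y max_x max_y '.' cells
        (pvScatter min_x min_y max_x max_y 'X' blocked
          (List.replicate (max_y - min_y + 1).toNat
            (List.replicate (max_x - min_x + 1).toNat '?')))).map (fun row => String.ofList row)) := by
  rw [PySem.List.foldl_append_singleton_eq_map, List.nil_append, pvGrid_eq]
  congr 1
  rw [PySem.List.pyRange_neg_one]
  have hhn : max_y - (min_y - 1) = max_y - min_y + 1 := by ring
  rw [hhn]
  unfold pvMat
  rw [List.map_map, List.map_map]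
  apply List.map_congr_left
  intro r _
  simp only [Function.comp]
  rw [pvRowA_eq, PySem.List.pyRange_one]
  have hwn : max_x + 1 - min_x = max_x - min_x + 1 := by ring
  rw [hwn, List.map_map]
  rfl

theorem pvMin?_congr (xs ys : List Int) (hx : xs ≠ []) (hiff : ∀ a, a ∈ xs ↔ a ∈ ys) :
    PySem.List.min? xs (fun v => v) = PySem.List.min? ys (fun v => v) := by
  obtain ⟨a, ha⟩ := List.exists_mem_of_ne_nil xs hx
  have hy : ys ≠ [] := List.ne_nil_of_mem ((hiff a).mp ha)
  cases h1 : PySem.List.min? xs (fun v => v) with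
  | none => exact absurd ((PySem.List.min?_eq_none_iff _ _).mp h1) hx
  | some m =>
    cases h2 : PySem.List.min? ys (fun v => v) with
    | none => exact absurd ((PySem.List.min?_eq_none_iff _ _).mp h2) hy
    | some m' =>
      congr 1
      have hm := PySem.List.min?_mem h1
      have hm' := PySem.List.min?_mem h2
      exact le_antisymm (PySem.List.min?_isMin h1 m' ((hiff m').mpr hm'))
        (PySem.List.min?_isMin h2 m ((hiff m).mp hm))

theorem pvMax?_congr (xs ys : List Int) (hx : xs ≠ []) (hiff : ∀ a, a ∈ xs ↔ a ∈ ys) :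
    PySem.List.max? xs (fun v => v) = PySem.List.max? ys (fun v => v) := by
  obtain ⟨a, ha⟩ := List.exists_mem_of_ne_nil xs hx
  have hy : ys ≠ [] := List.ne_nil_of_mem ((hiff a).mp ha)
  cases h1 : PySem.List.max? xs (fun v => v) with
  | none => exact absurd ((PySem.List.max?_eq_none_iff _ _).mp h1) hx
  | some m =>
    cases h2 : PySem.List.max? ys (fun v => v) with
    | none => exact absurd ((PySem.List.max?_eq_none_iff _ _).mp h2) hy
    | some m' =>
      congr 1
      have hm := PySem.List.max?_mem h1
      have hm' := PySem.List.max?_mem h2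
      exact le_antisymm (PySem.List.max?_isMax h2 m ((hiff m).mp hm))
        (PySem.List.max?_isMax h1 m' ((hiff m').mpr hm'))

theorem pvBox_eq (cells blocked : List (Int × Int)) (bbox : Option (Int × Int × Int × Int))
    (hc : cells ≠ []) : pvBoxB cells blocked bbox = pvBoxA cells blocked bbox := by
  cases bbox with
  | some b => rfl
  | none =>
    simp only [pvBoxA, pvBoxB]
    have hx : ∀ a : Int, a ∈ cells.map (·.1) ++ blocked.map (·.1) ↔
        a ∈ (PySem.Set.union (PySem.Set.ofList cells) blocked).map (·.1) := by
      intro a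
      simp only [List.mem_append, List.mem_map, PySem.Set.mem_union, PySem.Set.mem_ofList]
      aesop
    have hy : ∀ a : Int, a ∈ cells.map (·.2) ++ blocked.map (·.2) ↔
        a ∈ (PySem.Set.union (PySem.Set.ofList cells) blocked).map (·.2) := by
      intro a
      simp only [List.mem_append, List.mem_map, PySem.Set.mem_union, PySem.Set.mem_ofList]
      aesop
    have hxne : cells.map (·.1) ++ blocked.map (·.1) ≠ ([] : List Int) := by
      cases cells with
      | nil => exact absurd rfl hc
      | cons p t => simp
    have hyne : cells.map (·.2) ++ blocked.map (·.2) ≠ ([] : List Int) := by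
      cases cells with
      | nil => exact absurd rfl hc
      | cons p t => simp
    rw [pvMin?_congr _ _ hxne hx, pvMin?_congr _ _ hyne hy,
        pvMax?_congr _ _ hxne hx, pvMax?_congr _ _ hyne hy]

-- ===== VERDICT (by name: the statement is the Claim_ definition above) =====
theorem subproblem_to_pattern_py_spec : Claim_equal_subproblem_to_pattern_py := by
  intro cells blocked bbox _
  unfold Spec_subproblem_to_pattern_py subproblem_to_pattern_py subproblem_to_pattern_py_alt
  by_cases hc : cells = []
  · simp [hc]
  · simp only [if_neg hc]
    rw [pvBox_eq cells blocked bbox hc]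
    exact Prod.ext (pvCore cells blocked _ _ _ _) rfl
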